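-- pv_equiv track=rewrite | github.com/Jasonmellet/GTM_data-enrichment | clients/schreiber/scripts/02_email_generator.py | parse_three_emails
-- ===== SOURCE A (Python) =====
-- def parse_three_emails(ai_response):
--     """
--     Parse the AI response to extract the three emails with their sections.
--     """
--     emails = []
--     current_email = {}
--
--     lines = ai_response.split('\n')
--
--     for line in lines:
--         line = line.strip()
--
--         if line.startswith('EMAIL'):
--             if current_email:
--                 emails.append(current_email)
--             current_email = {}
--
--         elif line.startswith('Subject:'):
--             current_email['subject'] = line.replace('Subject:', '').strip()
--         elif line.startswith('Icebreaker:'):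
--             current_email['icebreaker'] = line.replace('Icebreaker:', '').strip()
--         elif line.startswith('Body:'):
--             current_email['body'] = line.replace('Body:', '').strip()
--         elif line.startswith('CTA:'):
--             current_email['cta'] = line.replace('CTA:', '').strip()
--
--     # Add the last email
--     if current_email:
--         emails.append(current_email)
--
--     return emails
-- ===== SOURCE B (Python) =====
-- def parse_three_emails(ai_response):
--     """
--     Parse the AI response into email dicts: phase 1 groups the stripped lines
--     at each 'EMAIL' marker line, phase 2 parses each group into a dict.
--     """
--     groups = []
--     current_group = []
--     for line in ai_response.split('\n'):
--         line = line.strip()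
--         if line.startswith('EMAIL'):
--             groups.append(current_group)
--             current_group = []
--         else:
--             current_group.append(line)
--     groups.append(current_group)
--
--     emails = []
--     for group in groups:
--         email = {}
--         for line in group:
--             if line.startswith('Subject:'):
--                 email['subject'] = line.replace('Subject:', '').strip()
--             elif line.startswith('Icebreaker:'):
--                 email['icebreaker'] = line.replace('Icebreaker:', '').strip()
--             elif line.startswith('Body:'):
--                 email['body'] = line.replace('Body:', '').strip()
--             elif line.startswith('CTA:'):
--                 email['cta'] = line.replace('CTA:', '').strip()
--         if email:
--             emails.append(email)
--     return emails
-- ===== Notes on version B (the rewrite author's own statement) =====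
-- stated objective: alternative
-- what changed: Replaces the single interleaved pass (flushing a running dict at each EMAIL marker) with a two-phase computation: first split the stripped lines into groups at EMAIL lines, then parse each group into a dict and keep the non-empty ones.
import Mathlib
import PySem

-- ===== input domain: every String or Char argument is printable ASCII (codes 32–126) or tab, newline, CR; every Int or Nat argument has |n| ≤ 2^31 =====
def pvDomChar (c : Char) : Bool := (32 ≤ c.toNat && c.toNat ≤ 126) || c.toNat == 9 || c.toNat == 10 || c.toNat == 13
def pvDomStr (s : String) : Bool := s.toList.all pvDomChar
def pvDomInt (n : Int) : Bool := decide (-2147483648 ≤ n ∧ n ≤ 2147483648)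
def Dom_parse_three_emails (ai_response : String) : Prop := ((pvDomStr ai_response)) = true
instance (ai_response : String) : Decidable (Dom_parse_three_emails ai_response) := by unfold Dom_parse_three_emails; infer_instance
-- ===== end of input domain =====

-- B replaces A's single interleaved pass with a two-phase computation (group lines at EMAIL markers, then parse each group); same cost, different decomposition.


-- ===== PORT A =====
-- one loop step of A's for-loop: flush the running dict on an EMAIL line, else elif-chain of field updates
def pvStepA (st : List (List (String × String)) × PySem.Dict String String) (line0 : String) :
    List (List (String × String)) × PySem.Dict String String :=
  let line := PySem.Str.strip line0
  if PySem.Str.startswith line "EMAIL" then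
    ((if st.2.items ≠ [] then st.1 ++ [st.2.items] else st.1), PySem.Dict.empty)
  else if PySem.Str.startswith line "Subject:" then
    (st.1, st.2.insert "subject" (PySem.Str.strip (PySem.Str.replace line "Subject:" "")))
  else if PySem.Str.startswith line "Icebreaker:" then
    (st.1, st.2.insert "icebreaker" (PySem.Str.strip (PySem.Str.replace line "Icebreaker:" "")))
  else if PySem.Str.startswith line "Body:" then
    (st.1, st.2.insert "body" (PySem.Str.strip (PySem.Str.replace line "Body:" "")))
  else if PySem.Str.startswith line "CTA:" then
    (st.1, st.2.insert "cta" (PySem.Str.strip (PySem.Str.replace line "CTA:" "")))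
  else st

def parse_three_emails (ai_response : String) : List (List (String × String)) :=
  let lines := (PySem.Str.split? ai_response "\n").getD []
  let st := lines.foldl pvStepA ([], PySem.Dict.empty)
  if st.2.items ≠ [] then st.1 ++ [st.2.items] else st.1

-- ===== PORT B =====
-- phase-1 step: start a new group at an EMAIL line, else append the stripped line to the current group
def pvGStep (st : List (List String) × List String) (line0 : String) :
    List (List String) × List String :=
  let line := PySem.Str.strip line0
  if PySem.Str.startswith line "EMAIL" then (st.1 ++ [st.2], [])
  else (st.1, st.2 ++ [line])

-- phase-2 field update (B's inner elif chain; lines are already stripped)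
def pvFieldStep (d : PySem.Dict String String) (line : String) : PySem.Dict String String :=
  if PySem.Str.startswith line "Subject:" then
    d.insert "subject" (PySem.Str.strip (PySem.Str.replace line "Subject:" ""))
  else if PySem.Str.startswith line "Icebreaker:" then
    d.insert "icebreaker" (PySem.Str.strip (PySem.Str.replace line "Icebreaker:" ""))
  else if PySem.Str.startswith line "Body:" then
    d.insert "body" (PySem.Str.strip (PySem.Str.replace line "Body:" ""))
  else if PySem.Str.startswith line "CTA:" then
    d.insert "cta" (PySem.Str.strip (PySem.Str.replace line "CTA:" ""))
  else d

def pvParseGroup (g : List String) : PySem.Dict String String :=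
  g.foldl pvFieldStep PySem.Dict.empty

def pvCollectStep (acc : List (List (String × String))) (g : List String) :
    List (List (String × String)) :=
  let d := pvParseGroup g
  if d.items ≠ [] then acc ++ [d.items] else acc

def parse_three_emails_alt (ai_response : String) : List (List (String × String)) :=
  let lines := (PySem.Str.split? ai_response "\n").getD []
  let st := lines.foldl pvGStep ([], [])
  let groups := st.1 ++ [st.2]
  groups.foldl pvCollectStep []

-- ===== PRECONDITION & SPEC =====
def Spec_parse_three_emails (ai_response : String) (out : List (List (String × String))) : Prop := out = parse_three_emails_alt ai_response
instance (ai_response : String) (out : List (List (String × String))) : Decidable (Spec_parse_three_emails ai_response out) := by unfold Spec_parse_three_emails; infer_instance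

-- ===== CLAIM (what is proved, stated in full; the proofs are below) =====
def Claim_equal_parse_three_emails : Prop := ∀ (ai_response : String), Dom_parse_three_emails ai_response → Spec_parse_three_emails ai_response (parse_three_emails ai_response)

-- ===== LEMMAS AND PROOFS =====

-- common recursive characterisation of the result, over the list of raw lines
def pvSpecRec (cur : PySem.Dict String String) : List String → List (List (String × String))
  | [] => if cur.items ≠ [] then [cur.items] else []
  | l :: ls =>
    let s := PySem.Str.strip l
    if PySem.Str.startswith s "EMAIL" then
      if cur.items ≠ [] then cur.items :: pvSpecRec PySem.Dict.empty ls
      else pvSpecRec PySem.Dict.empty ls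
    else pvSpecRec (pvFieldStep cur s) ls

def pvFinishA (st : List (List (String × String)) × PySem.Dict String String) :
    List (List (String × String)) :=
  if st.2.items ≠ [] then st.1 ++ [st.2.items] else st.1

def pvCollectAll (st : List (List String) × List String) : List (List (String × String)) :=
  (st.1 ++ [st.2]).foldl pvCollectStep []

theorem pvA_eq (ls : List String) : ∀ (st : List (List (String × String)) × PySem.Dict String String),
    pvFinishA (ls.foldl pvStepA st) = st.1 ++ pvSpecRec st.2 ls := by
  induction ls with
  | nil =>
    intro st
    simp only [List.foldl_nil, pvSpecRec, pvFinishA]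
    split <;> simp
  | cons l ls ih =>
    intro st
    rw [List.foldl_cons, ih]
    simp only [pvStepA, pvSpecRec, pvFieldStep]
    split_ifs <;> simp

theorem pvB_eq (ls : List String) : ∀ (st : List (List String) × List String),
    pvCollectAll (ls.foldl pvGStep st) = (st.1.foldl pvCollectStep []) ++ pvSpecRec (pvParseGroup st.2) ls := by
  induction ls with
  | nil =>
    intro st
    simp only [List.foldl_nil, pvSpecRec, pvCollectAll, List.foldl_append, List.foldl_cons,
      pvCollectStep]
    split <;> simp
  | cons l ls ih =>
    intro st
    rw [List.foldl_cons, ih]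
    simp only [pvGStep, pvSpecRec]
    split_ifs with hE hc
    · simp only [pvParseGroup] at hc
      simp [List.foldl_append, pvCollectStep, pvParseGroup, hc]
    · simp only [pvParseGroup, ne_eq, not_not] at hc
      simp [List.foldl_append, pvCollectStep, pvParseGroup, hc]
    · simp [pvParseGroup, List.foldl_append]

-- ===== VERDICT (by name: the statement is the Claim_ definition above) =====
theorem parse_three_emails_spec : Claim_equal_parse_three_emails := by
  intro ai _
  show parse_three_emails ai = parse_three_emails_alt ai
  have hA : parse_three_emails ai =
      pvFinishA (((PySem.Str.split? ai "\n").getD []).foldl pvStepA ([], PySem.Dict.empty)) := rfl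
  have hB : parse_three_emails_alt ai =
      pvCollectAll (((PySem.Str.split? ai "\n").getD []).foldl pvGStep ([], [])) := rfl
  rw [hA, hB, pvA_eq, pvB_eq]
  simp [pvParseGroup]
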